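-- pv_equiv track=rewrite | github.com/TheIcySpark/BinarySearch | Sublists Containing Maximum and Minimum.py | calculate_number_sublists
-- ===== SOURCE A (Python) =====
-- def calculate_number_sublists(min_value, max_value, nums):
--     start, end, last_start = 0, 0, 0
--     first_found = ''
--     i = 0
--     s = 0
--     while i < len(nums):
--         if nums[i] == min_value:
--             if first_found == '':
--                 start = i
--                 first_found = 'MIN'
--             elif first_found == 'MIN':
--                 start = i
--             elif first_found == 'MAX':
--                 end = i
--                 s += (start - last_start + 1) * (len(nums) - end)
--                 last_start = start + 1
--                 last_end = end
--                 first_found = 'MIN'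
--                 start = end
--         elif nums[i] == max_value:
--             if first_found == '':
--                 start = i
--                 first_found = 'MAX'
--             elif first_found == 'MAX':
--                 start = i
--             elif first_found == 'MIN':
--                 end = i
--                 s += (start - last_start + 1) * (len(nums) - end)
--                 last_start = start + 1
--                 last_end = end
--                 first_found = 'MAX'
--                 start = end
--         i += 1
--     return s
-- ===== SOURCE B (Python) =====
-- def calculate_number_sublists(min_value, max_value, nums):
--     last_min = -1
--     last_max = -1
--     s = 0
--     for j, v in enumerate(nums):
--         if v == min_value:
--             last_min = j
--         elif v == max_value:
--             last_max = j
--         if last_min >= 0 and last_max >= 0: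
--             s += min(last_min, last_max) + 1
--     return s
-- ===== Notes on version B (the rewrite author's own statement) =====
-- stated objective: simpler
-- what changed: Replaces A's first_found/start/last_start alternation state machine (which pays (run length)*(remaining length) at each min/max alternation) by a single pass that, for each right endpoint, adds min(last_min_index, last_max_index)+1 valid left endpoints once both values have been seen.
import Mathlib
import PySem

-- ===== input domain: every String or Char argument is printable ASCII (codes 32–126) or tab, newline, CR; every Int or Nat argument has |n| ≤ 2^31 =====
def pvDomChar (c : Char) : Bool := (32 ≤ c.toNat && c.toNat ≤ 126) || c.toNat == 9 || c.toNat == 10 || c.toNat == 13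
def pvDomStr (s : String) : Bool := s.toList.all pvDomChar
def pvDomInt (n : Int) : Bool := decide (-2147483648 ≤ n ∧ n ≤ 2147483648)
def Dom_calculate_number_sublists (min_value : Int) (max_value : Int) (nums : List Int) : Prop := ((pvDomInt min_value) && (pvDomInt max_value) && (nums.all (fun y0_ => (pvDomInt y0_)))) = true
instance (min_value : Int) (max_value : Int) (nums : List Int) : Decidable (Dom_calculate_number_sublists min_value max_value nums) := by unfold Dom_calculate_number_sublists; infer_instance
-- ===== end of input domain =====

-- B replaces A's first_found/start/last_start alternation state machine by a per-right-endpoint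
-- count min(last_min, last_max) + 1 — same O(n) cost, simpler state (objective: simpler).

-- ===== PORT A =====
-- A's while-loop over i < len(nums), carried as structural recursion over the not-yet-visited
-- suffix with the running index i; n = len(nums) is fixed. The Python variable last_end is
-- write-only (never read) and is not carried; 'end' is 'end_' below.
def pvALoop (min_value max_value n : Int) :
    List Int → Int → Int → Int → String → Int → Int
  | [], _, _, _, _, s => s
  | v :: rest, i, start, last_start, first_found, s =>
    if v = min_value then
      if first_found = "" then
        pvALoop min_value max_value n rest (i + 1) i last_start "MIN" s
      else if first_found = "MIN" then
        pvALoop min_value max_value n rest (i + 1) i last_start "MIN" s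
      else if first_found = "MAX" then
        let end_ := i
        pvALoop min_value max_value n rest (i + 1) end_ (start + 1) "MIN"
          (s + (start - last_start + 1) * (n - end_))
      else
        pvALoop min_value max_value n rest (i + 1) start last_start first_found s
    else if v = max_value then
      if first_found = "" then
        pvALoop min_value max_value n rest (i + 1) i last_start "MAX" s
      else if first_found = "MAX" then
        pvALoop min_value max_value n rest (i + 1) i last_start "MAX" s
      else if first_found = "MIN" then
        let end_ := i
        pvALoop min_value max_value n rest (i + 1) end_ (start + 1) "MAX"
          (s + (start - last_start + 1) * (n - end_))
      else
        pvALoop min_value max_value n rest (i + 1) start last_start first_found s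
    else
      pvALoop min_value max_value n rest (i + 1) start last_start first_found s

def calculate_number_sublists (min_value : Int) (max_value : Int) (nums : List Int) : Int :=
  pvALoop min_value max_value (nums.length : Int) nums 0 0 0 "" 0

-- ===== PORT B =====
-- B's for-loop over enumerate(nums): last_min/last_max are the latest matching indices (-1 = unseen).
def pvBLoop (min_value max_value : Int) :
    List Int → Int → Int → Int → Int → Int
  | [], _, _, _, s => s
  | v :: rest, j, last_min, last_max, s =>
    let lm := if v = min_value then j else last_min
    let lx := if v = min_value then last_max else if v = max_value then j else last_max
    pvBLoop min_value max_value rest (j + 1) lm lx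
      (if 0 ≤ lm ∧ 0 ≤ lx then s + (min lm lx + 1) else s)

def calculate_number_sublists_alt (min_value : Int) (max_value : Int) (nums : List Int) : Int :=
  pvBLoop min_value max_value nums 0 (-1) (-1) 0

-- ===== PRECONDITION & SPEC =====
def Spec_calculate_number_sublists (min_value : Int) (max_value : Int) (nums : List Int) (out : Int) : Prop := out = calculate_number_sublists_alt min_value max_value nums
instance (min_value : Int) (max_value : Int) (nums : List Int) (out : Int) : Decidable (Spec_calculate_number_sublists min_value max_value nums out) := by unfold Spec_calculate_number_sublists; infer_instance

-- ===== CLAIM (what is proved, stated in full; the proofs are below) =====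
def Claim_equal_calculate_number_sublists : Prop := ∀ (min_value : Int) (max_value : Int) (nums : List Int), Dom_calculate_number_sublists min_value max_value nums → Spec_calculate_number_sublists min_value max_value nums (calculate_number_sublists min_value max_value nums)

-- ===== LEMMAS AND PROOFS =====

-- Joint invariant tying A's state (start, last_start, first_found, s) to B's (last_min, last_max, sB)
-- after the first i of the n list elements have been consumed.
def pvInv (n i start last_start : Int) (first_found : String) (s last_min last_max sB : Int) : Prop :=
  (first_found = "" ∧ last_min = -1 ∧ last_max = -1 ∧ last_start = 0 ∧ s = 0 ∧ sB = 0)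
  ∨ (first_found = "MIN" ∧ last_max = -1 ∧ last_min = start ∧ 0 ≤ start ∧ start < i ∧
      last_start = 0 ∧ s = 0 ∧ sB = 0)
  ∨ (first_found = "MAX" ∧ last_min = -1 ∧ last_max = start ∧ 0 ≤ start ∧ start < i ∧
      last_start = 0 ∧ s = 0 ∧ sB = 0)
  ∨ (first_found = "MIN" ∧ 0 ≤ last_max ∧ last_max < last_min ∧ last_min = start ∧ start < i ∧
      last_start = last_max + 1 ∧ s = sB + (n - i) * (last_max + 1))
  ∨ (first_found = "MAX" ∧ 0 ≤ last_min ∧ last_min < last_max ∧ last_max = start ∧ start < i ∧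
      last_start = last_min + 1 ∧ s = sB + (n - i) * (last_min + 1))

lemma pvLoop_eq (min_value max_value n : Int) :
    ∀ (rest : List Int) (i start last_start : Int) (first_found : String)
      (s last_min last_max sB : Int),
      0 ≤ i → n = i + rest.length →
      pvInv n i start last_start first_found s last_min last_max sB →
      pvALoop min_value max_value n rest i start last_start first_found s
        = pvBLoop min_value max_value rest i last_min last_max sB := by
  intro rest
  induction rest with
  | nil =>
    intro i start last_start ff s lm lx sB hi hn hinv
    simp only [List.length_nil, Int.natCast_zero, add_zero] at hn
    subst hn
    rcases hinv with ⟨_, _, _, _, hs, hsB⟩ | ⟨_, _, _, _, _, _, hs, hsB⟩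
      | ⟨_, _, _, _, _, _, hs, hsB⟩ | ⟨_, _, _, _, _, _, hs⟩ | ⟨_, _, _, _, _, _, hs⟩ <;>
      simp only [pvALoop, pvBLoop] <;> omega
  | cons v rest ih =>
    intro i start last_start ff s lm lx sB hi hn hinv
    have hn' : n = (i + 1) + rest.length := by
      simp only [List.length_cons] at hn; push_cast at hn ⊢; omega
    have hi' : (0:Int) ≤ i + 1 := by omega
    by_cases hv1 : v = min_value
    · subst hv1
      rcases hinv with ⟨hff, h1, h2, h3, hs, hsB⟩ | ⟨hff, h1, h2, h3, h4, h5, hs, hsB⟩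
        | ⟨hff, h1, h2, h3, h4, h5, hs, hsB⟩ | ⟨hff, h1, h2, h3, h4, h5, hs⟩
        | ⟨hff, h1, h2, h3, h4, h5, hs⟩ <;> subst hff <;>
        simp only [pvALoop, pvBLoop, reduceIte, String.reduceEq]
      -- ff = "" : first min seen
      · rw [if_neg (by omega : ¬ ((0:Int) ≤ i ∧ (0:Int) ≤ lx))]
        exact ih (i + 1) i last_start "MIN" s i lx sB hi' hn'
          (Or.inr (Or.inl ⟨rfl, h2, rfl, hi, by omega, h3, hs, hsB⟩))
      -- ff = "MIN", max unseen : another min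
      · rw [if_neg (by omega : ¬ ((0:Int) ≤ i ∧ (0:Int) ≤ lx))]
        exact ih (i + 1) i last_start "MIN" s i lx sB hi' hn'
          (Or.inr (Or.inl ⟨rfl, h1, rfl, hi, by omega, h5, hs, hsB⟩))
      -- ff = "MAX", min unseen : first alternation, A flushes
      · rw [if_pos (by omega : (0:Int) ≤ i ∧ (0:Int) ≤ lx),
            min_eq_right (by omega : lx ≤ i)]
        refine ih (i + 1) i (start + 1) "MIN" _ i lx _ hi' hn'
          (Or.inr (Or.inr (Or.inr (Or.inl ⟨rfl, by omega, by omega, rfl, by omega, by omega, ?_⟩))))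
        subst h2; subst h5; subst hs; subst hsB; ring
      -- ff = "MIN", both seen : another min
      · rw [if_pos (by omega : (0:Int) ≤ i ∧ (0:Int) ≤ lx),
            min_eq_right (by omega : lx ≤ i)]
        refine ih (i + 1) i last_start "MIN" s i lx _ hi' hn'
          (Or.inr (Or.inr (Or.inr (Or.inl ⟨rfl, h1, by omega, rfl, by omega, h5, ?_⟩))))
        linear_combination hs
      -- ff = "MAX", both seen : alternation, A flushes
      · rw [if_pos (by omega : (0:Int) ≤ i ∧ (0:Int) ≤ lx),
            min_eq_right (by omega : lx ≤ i)]
        refine ih (i + 1) i (start + 1) "MIN" _ i lx _ hi' hn'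
          (Or.inr (Or.inr (Or.inr (Or.inl ⟨rfl, by omega, by omega, rfl, by omega, by omega, ?_⟩))))
        subst h3; subst h5; linear_combination hs
    · by_cases hv2 : v = max_value
      · subst hv2
        rcases hinv with ⟨hff, h1, h2, h3, hs, hsB⟩ | ⟨hff, h1, h2, h3, h4, h5, hs, hsB⟩
          | ⟨hff, h1, h2, h3, h4, h5, hs, hsB⟩ | ⟨hff, h1, h2, h3, h4, h5, hs⟩
          | ⟨hff, h1, h2, h3, h4, h5, hs⟩ <;> subst hff <;>
          simp only [pvALoop, pvBLoop, if_neg hv1, reduceIte, String.reduceEq]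
        -- ff = "" : first max seen
        · rw [if_neg (by omega : ¬ ((0:Int) ≤ lm ∧ (0:Int) ≤ i))]
          exact ih (i + 1) i last_start "MAX" s lm i sB hi' hn'
            (Or.inr (Or.inr (Or.inl ⟨rfl, h1, rfl, hi, by omega, h3, hs, hsB⟩)))
        -- ff = "MIN", max unseen : first alternation, A flushes
        · rw [if_pos (by omega : (0:Int) ≤ lm ∧ (0:Int) ≤ i),
              min_eq_left (by omega : lm ≤ i)]
          refine ih (i + 1) i (start + 1) "MAX" _ lm i _ hi' hn'
            (Or.inr (Or.inr (Or.inr (Or.inr ⟨rfl, by omega, by omega, rfl, by omega, by omega, ?_⟩))))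
          subst h2; subst h5; subst hs; subst hsB; ring
        -- ff = "MAX", min unseen : another max
        · rw [if_neg (by omega : ¬ ((0:Int) ≤ lm ∧ (0:Int) ≤ i))]
          exact ih (i + 1) i last_start "MAX" s lm i sB hi' hn'
            (Or.inr (Or.inr (Or.inl ⟨rfl, h1, rfl, hi, by omega, h5, hs, hsB⟩)))
        -- ff = "MIN", both seen : alternation, A flushes
        · rw [if_pos (by omega : (0:Int) ≤ lm ∧ (0:Int) ≤ i),
              min_eq_left (by omega : lm ≤ i)]
          refine ih (i + 1) i (start + 1) "MAX" _ lm i _ hi' hn'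
            (Or.inr (Or.inr (Or.inr (Or.inr ⟨rfl, by omega, by omega, rfl, by omega, by omega, ?_⟩))))
          subst h3; subst h5; linear_combination hs
        -- ff = "MAX", both seen : another max
        · rw [if_pos (by omega : (0:Int) ≤ lm ∧ (0:Int) ≤ i),
              min_eq_left (by omega : lm ≤ i)]
          refine ih (i + 1) i last_start "MAX" s lm i _ hi' hn'
            (Or.inr (Or.inr (Or.inr (Or.inr ⟨rfl, h1, by omega, rfl, by omega, h5, ?_⟩))))
          linear_combination hs
      · rcases hinv with ⟨hff, h1, h2, h3, hs, hsB⟩ | ⟨hff, h1, h2, h3, h4, h5, hs, hsB⟩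
          | ⟨hff, h1, h2, h3, h4, h5, hs, hsB⟩ | ⟨hff, h1, h2, h3, h4, h5, hs⟩
          | ⟨hff, h1, h2, h3, h4, h5, hs⟩ <;> subst hff <;>
          simp only [pvALoop, pvBLoop, if_neg hv1, if_neg hv2]
        · rw [if_neg (by omega : ¬ ((0:Int) ≤ lm ∧ (0:Int) ≤ lx))]
          exact ih (i + 1) start last_start "" s lm lx sB hi' hn'
            (Or.inl ⟨rfl, h1, h2, h3, hs, hsB⟩)
        · rw [if_neg (by omega : ¬ ((0:Int) ≤ lm ∧ (0:Int) ≤ lx))]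
          exact ih (i + 1) start last_start "MIN" s lm lx sB hi' hn'
            (Or.inr (Or.inl ⟨rfl, h1, h2, h3, by omega, h5, hs, hsB⟩))
        · rw [if_neg (by omega : ¬ ((0:Int) ≤ lm ∧ (0:Int) ≤ lx))]
          exact ih (i + 1) start last_start "MAX" s lm lx sB hi' hn'
            (Or.inr (Or.inr (Or.inl ⟨rfl, h1, h2, h3, by omega, h5, hs, hsB⟩)))
        · rw [if_pos (by omega : (0:Int) ≤ lm ∧ (0:Int) ≤ lx),
              min_eq_right (by omega : lx ≤ lm)]
          refine ih (i + 1) start last_start "MIN" s lm lx _ hi' hn'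
            (Or.inr (Or.inr (Or.inr (Or.inl ⟨rfl, h1, h2, h3, by omega, h5, ?_⟩))))
          linear_combination hs
        · rw [if_pos (by omega : (0:Int) ≤ lm ∧ (0:Int) ≤ lx),
              min_eq_left (by omega : lm ≤ lx)]
          refine ih (i + 1) start last_start "MAX" s lm lx _ hi' hn'
            (Or.inr (Or.inr (Or.inr (Or.inr ⟨rfl, h1, h2, h3, by omega, h5, ?_⟩))))
          linear_combination hs

-- ===== VERDICT (by name: the statement is the Claim_ definition above) =====
theorem calculate_number_sublists_spec : Claim_equal_calculate_number_sublists := by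
  intro min_value max_value nums _
  show _ = _
  exact pvLoop_eq min_value max_value (nums.length : Int) nums 0 0 0 "" 0 (-1) (-1) 0
    le_rfl (by omega) (Or.inl ⟨rfl, rfl, rfl, rfl, rfl, rfl⟩)
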